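-- pv_equiv track=rewrite | github.com/chaguino30-pixel/nexlify-bot | app.py | parsear_confirmacion
-- ===== SOURCE A (Python) =====
-- def parsear_confirmacion(texto):
--     data = {}
--     for linea in texto.split("\n"):
--         l = linea.replace("*","").strip()
--         if "Nombre:" in l: data["nombre"] = l.split("Nombre:")[1].strip()
--         elif "Servicio:" in l: data["servicio"] = l.split("Servicio:")[1].strip()
--         elif "Fecha:" in l: data["fecha"] = l.split("Fecha:")[1].strip()
--         elif "Hora:" in l: data["hora"] = l.split("Hora:")[1].strip()
--     return data
-- ===== SOURCE B (Python) =====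
-- def parsear_confirmacion(texto):
--     labels = [("Nombre:", "nombre"), ("Servicio:", "servicio"),
--               ("Fecha:", "fecha"), ("Hora:", "hora")]
--     lines = [linea.replace("*", "").strip() for linea in texto.split("\n")]
--     # label-major claiming: each label pass claims every still-unclaimed line
--     # that contains it, so a line ends up claimed by its highest-priority label
--     claimed = [None] * len(lines)
--     for label, key in labels:
--         claimed = [c if c is not None or label not in l
--                    else (key, l.split(label)[1].strip())
--                    for c, l in zip(claimed, lines)]
--     data = {}
--     for ev in claimed:
--         if ev is not None:
--             data[ev[0]] = ev[1]
--     return data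
-- ===== Notes on version B (the rewrite author's own statement) =====
-- stated objective: alternative
-- what changed: Instead of A's line-major loop with an if/elif label chain, B runs label-major claiming passes: for each label in priority order it claims every still-unclaimed line containing it into a parallel Option array, then one final line-order fold of the claimed events builds the dict.
import Mathlib
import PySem

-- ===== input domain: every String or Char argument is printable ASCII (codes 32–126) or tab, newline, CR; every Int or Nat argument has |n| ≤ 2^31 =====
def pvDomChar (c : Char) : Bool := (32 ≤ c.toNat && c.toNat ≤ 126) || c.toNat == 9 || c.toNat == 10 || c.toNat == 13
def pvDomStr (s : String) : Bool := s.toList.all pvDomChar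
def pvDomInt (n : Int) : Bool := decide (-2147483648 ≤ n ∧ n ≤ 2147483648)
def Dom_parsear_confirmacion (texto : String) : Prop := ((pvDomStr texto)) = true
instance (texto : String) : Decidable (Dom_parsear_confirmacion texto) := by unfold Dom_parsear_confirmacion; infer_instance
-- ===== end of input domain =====

-- B is an alternative algorithm: label-major claiming passes over a parallel Option array
-- plus one final line-order fold, instead of A's line-major if/elif chain; same return value.

-- l.split(label)[1].strip()  (both Pythons contain this literal expression; the [1] cannot
-- fail where it is used because label occurs in l, so pyGetD "" is exact there)
def pvVal (l label : String) : String :=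
  PySem.Str.strip (PySem.List.pyGetD ((PySem.Str.split? l label).getD []) 1 "")

-- ===== PORT A =====
-- literal transliteration of A: split on "\n", clean each line, if/elif chain assigning into a dict
def parsear_confirmacion (texto : String) : List (String × String) :=
  ((((PySem.Str.split? texto "\n").getD [])).foldl (fun data linea =>
    let l := PySem.Str.strip (PySem.Str.replace linea "*" "")
    if PySem.Str.isIn "Nombre:" l then data.insert "nombre" (pvVal l "Nombre:")
    else if PySem.Str.isIn "Servicio:" l then data.insert "servicio" (pvVal l "Servicio:")
    else if PySem.Str.isIn "Fecha:" l then data.insert "fecha" (pvVal l "Fecha:")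
    else if PySem.Str.isIn "Hora:" l then data.insert "hora" (pvVal l "Hora:")
    else data) PySem.Dict.empty).items

-- ===== PORT B =====
-- one label pass: claims every still-unclaimed line containing the label
-- (the comprehension over zip(claimed, lines))
def pvPass (label key : String) (claimed : List (Option (String × String)))
    (lines : List String) : List (Option (String × String)) :=
  List.zipWith (fun c l =>
    if c.isSome || !(PySem.Str.isIn label l) then c else some (key, pvVal l label))
    claimed lines

def parsear_confirmacion_alt (texto : String) : List (String × String) :=
  let lines := (((PySem.Str.split? texto "\n").getD [])).map
    (fun linea => PySem.Str.strip (PySem.Str.replace linea "*" ""))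
  let c0 := lines.map (fun _ => (none : Option (String × String)))
  let c1 := pvPass "Nombre:" "nombre" c0 lines
  let c2 := pvPass "Servicio:" "servicio" c1 lines
  let c3 := pvPass "Fecha:" "fecha" c2 lines
  let c4 := pvPass "Hora:" "hora" c3 lines
  (c4.foldl (fun data ev => match ev with
    | some kv => data.insert kv.1 kv.2
    | none => data) PySem.Dict.empty).items

-- ===== PRECONDITION & SPEC =====
def Spec_parsear_confirmacion (texto : String) (out : List (String × String)) : Prop := out = parsear_confirmacion_alt texto
instance (texto : String) (out : List (String × String)) : Decidable (Spec_parsear_confirmacion texto out) := by unfold Spec_parsear_confirmacion; infer_instance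

-- ===== CLAIM (what is proved, stated in full; the proofs are below) =====
def Claim_equal_parsear_confirmacion : Prop := ∀ (texto : String), Dom_parsear_confirmacion texto → Spec_parsear_confirmacion texto (parsear_confirmacion texto)

-- ===== LEMMAS AND PROOFS =====

-- A's elif chain on a cleaned line, as an Option event
def pvClassify (l : String) : Option (String × String) :=
  if PySem.Str.isIn "Nombre:" l then some ("nombre", pvVal l "Nombre:")
  else if PySem.Str.isIn "Servicio:" l then some ("servicio", pvVal l "Servicio:")
  else if PySem.Str.isIn "Fecha:" l then some ("fecha", pvVal l "Fecha:")
  else if PySem.Str.isIn "Hora:" l then some ("hora", pvVal l "Hora:")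
  else none

-- on a single line, the four claiming steps compute the classification
theorem pvSteps_head (l : String) :
    (fun c => if c.isSome || !(PySem.Str.isIn "Hora:" l) then c else some ("hora", pvVal l "Hora:"))
      ((fun c => if c.isSome || !(PySem.Str.isIn "Fecha:" l) then c else some ("fecha", pvVal l "Fecha:"))
        ((fun c => if c.isSome || !(PySem.Str.isIn "Servicio:" l) then c else some ("servicio", pvVal l "Servicio:"))
          ((fun c => if c.isSome || !(PySem.Str.isIn "Nombre:" l) then c else some ("nombre", pvVal l "Nombre:"))
            none)))
    = pvClassify l := by
  cases h1 : PySem.Str.isIn "Nombre:" l <;>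
    cases h2 : PySem.Str.isIn "Servicio:" l <;>
      cases h3 : PySem.Str.isIn "Fecha:" l <;>
        cases h4 : PySem.Str.isIn "Hora:" l <;>
          simp only [pvClassify, h1, h2, h3, h4, Bool.not_true, Bool.not_false] <;> rfl

-- the four claiming passes compute exactly the per-line classification
theorem pvPasses_eq_map_classify (lines : List String) :
    pvPass "Hora:" "hora"
      (pvPass "Fecha:" "fecha"
        (pvPass "Servicio:" "servicio"
          (pvPass "Nombre:" "nombre" (lines.map (fun _ => none)) lines) lines) lines) lines
    = lines.map pvClassify := by
  induction lines with
  | nil => rfl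
  | cons l ls ih =>
    simp only [List.map_cons, pvPass, List.zipWith_cons_cons] at *
    rw [ih]
    congr 1
    exact pvSteps_head l

-- one classified event folded into the dict equals A's per-line elif step
theorem pvStep_classify (d : PySem.Dict String String) (l : String) :
    (match pvClassify l with
      | some kv => d.insert kv.1 kv.2
      | none => d)
    = (if PySem.Str.isIn "Nombre:" l then d.insert "nombre" (pvVal l "Nombre:")
       else if PySem.Str.isIn "Servicio:" l then d.insert "servicio" (pvVal l "Servicio:")
       else if PySem.Str.isIn "Fecha:" l then d.insert "fecha" (pvVal l "Fecha:")
       else if PySem.Str.isIn "Hora:" l then d.insert "hora" (pvVal l "Hora:")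
       else d) := by
  unfold pvClassify
  split_ifs <;> rfl

-- folding the classified events in line order equals A's fold over the raw lines
theorem pvFold_classify_eq (raw : List String) (d : PySem.Dict String String) :
    ((raw.map (fun linea => PySem.Str.strip (PySem.Str.replace linea "*" ""))).map
        pvClassify).foldl (fun data ev => match ev with
          | some kv => data.insert kv.1 kv.2
          | none => data) d
    = raw.foldl (fun data linea =>
        let l := PySem.Str.strip (PySem.Str.replace linea "*" "")
        if PySem.Str.isIn "Nombre:" l then data.insert "nombre" (pvVal l "Nombre:")
        else if PySem.Str.isIn "Servicio:" l then data.insert "servicio" (pvVal l "Servicio:")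
        else if PySem.Str.isIn "Fecha:" l then data.insert "fecha" (pvVal l "Fecha:")
        else if PySem.Str.isIn "Hora:" l then data.insert "hora" (pvVal l "Hora:")
        else data) d := by
  induction raw generalizing d with
  | nil => rfl
  | cons r rs ih =>
    simp only [List.map_cons, List.foldl_cons]
    rw [pvStep_classify, ih]

-- ===== VERDICT (by name: the statement is the Claim_ definition above) =====
theorem parsear_confirmacion_spec : Claim_equal_parsear_confirmacion := by
  intro texto _
  show parsear_confirmacion texto = parsear_confirmacion_alt texto
  unfold parsear_confirmacion parsear_confirmacion_alt
  dsimp only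
  rw [pvPasses_eq_map_classify, pvFold_classify_eq]
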